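-- pv_equiv track=rewrite | github.com/Matze190519/Sozial | count_all_apis.py | categorize_apis
-- ===== SOURCE A (Python) =====
-- def categorize_apis(api_urls):
--     """Categorize APIs by service provider"""
--     categories = {
--         'fal.ai': [],
--         'anthropic': [],
--         'openai': [],
--         'elevenlabs': [],
--         'heygen': [],
--         'perplexity': [],
--         'social_media': [],
--         'crm_lead_gen': [],
--         'analytics': [],
--         'other': []
--     }
--
--     for url in api_urls:
--         url_lower = url.lower()
--         if 'fal.run/fal-ai' in url_lower:
--             categories['fal.ai'].append(url)
--         elif 'anthropic.com' in url_lower: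
--             categories['anthropic'].append(url)
--         elif 'openai.com' in url_lower:
--             categories['openai'].append(url)
--         elif 'elevenlabs.io' in url_lower:
--             categories['elevenlabs'].append(url)
--         elif 'heygen.com' in url_lower:
--             categories['heygen'].append(url)
--         elif 'perplexity.ai' in url_lower:
--             categories['perplexity'].append(url)
--         elif any(x in url_lower for x in ['blotato', 'klap', 'simplified', 'predis', 'metricool', 'telegram']):
--             categories['social_media'].append(url)
--         elif any(x in url_lower for x in ['apollo.io', 'snov.io', 'hubapi.com', 'wassenger']):
--             categories['crm_lead_gen'].append(url)
--         elif any(x in url_lower for x in ['analytics', 'tracking', 'newsapi', 'reddit', 'youtube']):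
--             categories['analytics'].append(url)
--         else:
--             categories['other'].append(url)
--
--     return categories
-- ===== SOURCE B (Python) =====
-- RULES = [
--     ('fal.ai', ['fal.run/fal-ai']),
--     ('anthropic', ['anthropic.com']),
--     ('openai', ['openai.com']),
--     ('elevenlabs', ['elevenlabs.io']),
--     ('heygen', ['heygen.com']),
--     ('perplexity', ['perplexity.ai']),
--     ('social_media', ['blotato', 'klap', 'simplified', 'predis', 'metricool', 'telegram']),
--     ('crm_lead_gen', ['apollo.io', 'snov.io', 'hubapi.com', 'wassenger']),
--     ('analytics', ['analytics', 'tracking', 'newsapi', 'reddit', 'youtube']),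
-- ]
--
--
-- def _label(url):
--     """First rule (in priority order) whose pattern occurs in the lowercased url."""
--     u = url.lower()
--     for name, patterns in RULES:
--         if any(p in u for p in patterns):
--             return name
--     return 'other'
--
--
-- def categorize_apis(api_urls):
--     """Categorize APIs by service provider"""
--     labeled = [(_label(url), url) for url in api_urls]
--     names = [name for name, _ in RULES] + ['other']
--     return {name: [url for lab, url in labeled if lab == name] for name in names}
-- ===== Notes on version B (the rewrite author's own statement) =====
-- stated objective: simpler
-- what changed: Replaces the ten-way elif cascade that mutates per-category lists with a data-driven rule table: a helper labels each url with the first matching category name (labels computed once), and the result dict is built by a per-category comprehension over the labeled list.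
import Mathlib
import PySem

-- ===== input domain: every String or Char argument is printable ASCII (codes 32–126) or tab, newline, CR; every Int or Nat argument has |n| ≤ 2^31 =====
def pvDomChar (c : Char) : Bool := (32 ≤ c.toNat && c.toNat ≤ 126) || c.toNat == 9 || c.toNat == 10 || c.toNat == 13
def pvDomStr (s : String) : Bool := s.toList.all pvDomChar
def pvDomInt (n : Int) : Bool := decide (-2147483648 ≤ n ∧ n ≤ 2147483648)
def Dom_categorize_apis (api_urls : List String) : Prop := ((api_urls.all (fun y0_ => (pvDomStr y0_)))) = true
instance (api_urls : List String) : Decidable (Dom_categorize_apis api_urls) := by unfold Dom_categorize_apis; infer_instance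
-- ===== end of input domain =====

-- ===== PORT A =====
-- Port B replaces A's elif cascade with a rule table + per-category filters; objective: simpler.
def categorize_apis (api_urls : List String) : List (String × List String) :=
  let categories : PySem.Dict String (List String) := PySem.Dict.ofList
    [("fal.ai", []), ("anthropic", []), ("openai", []), ("elevenlabs", []), ("heygen", []),
     ("perplexity", []), ("social_media", []), ("crm_lead_gen", []), ("analytics", []), ("other", [])]
  let categories := api_urls.foldl (fun categories url =>
    let url_lower := PySem.Str.lower url
    if PySem.Str.isIn "fal.run/fal-ai" url_lower then categories.modify "fal.ai" [] (· ++ [url])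
    else if PySem.Str.isIn "anthropic.com" url_lower then categories.modify "anthropic" [] (· ++ [url])
    else if PySem.Str.isIn "openai.com" url_lower then categories.modify "openai" [] (· ++ [url])
    else if PySem.Str.isIn "elevenlabs.io" url_lower then categories.modify "elevenlabs" [] (· ++ [url])
    else if PySem.Str.isIn "heygen.com" url_lower then categories.modify "heygen" [] (· ++ [url])
    else if PySem.Str.isIn "perplexity.ai" url_lower then categories.modify "perplexity" [] (· ++ [url])
    else if (["blotato", "klap", "simplified", "predis", "metricool", "telegram"].any
        (fun x => PySem.Str.isIn x url_lower)) then categories.modify "social_media" [] (· ++ [url])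
    else if (["apollo.io", "snov.io", "hubapi.com", "wassenger"].any
        (fun x => PySem.Str.isIn x url_lower)) then categories.modify "crm_lead_gen" [] (· ++ [url])
    else if (["analytics", "tracking", "newsapi", "reddit", "youtube"].any
        (fun x => PySem.Str.isIn x url_lower)) then categories.modify "analytics" [] (· ++ [url])
    else categories.modify "other" [] (· ++ [url])) categories
  categories.items

-- ===== PORT B =====
def pvRules : List (String × List String) :=
  [("fal.ai", ["fal.run/fal-ai"]),
   ("anthropic", ["anthropic.com"]),
   ("openai", ["openai.com"]),
   ("elevenlabs", ["elevenlabs.io"]),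
   ("heygen", ["heygen.com"]),
   ("perplexity", ["perplexity.ai"]),
   ("social_media", ["blotato", "klap", "simplified", "predis", "metricool", "telegram"]),
   ("crm_lead_gen", ["apollo.io", "snov.io", "hubapi.com", "wassenger"]),
   ("analytics", ["analytics", "tracking", "newsapi", "reddit", "youtube"])]

-- the for-loop with early return in _label, as structural recursion over the rule table
def pvLabelGo (u : String) : List (String × List String) → String
  | [] => "other"
  | (name, patterns) :: rest =>
    if patterns.any (fun p => PySem.Str.isIn p u) then name else pvLabelGo u rest

def pvLabel (url : String) : String := pvLabelGo (PySem.Str.lower url) pvRules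

def categorize_apis_alt (api_urls : List String) : List (String × List String) :=
  let labeled := api_urls.map (fun url => (pvLabel url, url))
  let names := pvRules.map Prod.fst ++ ["other"]
  -- dict comprehension over the ten distinct names
  names.map (fun name => (name, (labeled.filter (fun p => p.1 == name)).map (fun p => p.2)))

-- ===== PRECONDITION & SPEC =====
def Spec_categorize_apis (api_urls : List String) (out : List (String × List String)) : Prop := out = categorize_apis_alt api_urls
instance (api_urls : List String) (out : List (String × List String)) : Decidable (Spec_categorize_apis api_urls out) := by unfold Spec_categorize_apis; infer_instance

-- ===== CLAIM (what is proved, stated in full; the proofs are below) =====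
def Claim_equal_categorize_apis : Prop := ∀ (api_urls : List String), Dom_categorize_apis api_urls → Spec_categorize_apis api_urls (categorize_apis api_urls)

-- ===== LEMMAS AND PROOFS =====

-- evaluating A's `modify` on the ten-entry category dict (literal keys, symbolic values)
theorem pvMod1 (v1 v2 v3 v4 v5 v6 v7 v8 v9 v10 : List String) (url : String) :
    (PySem.Dict.mk [("fal.ai", v1), ("anthropic", v2), ("openai", v3), ("elevenlabs", v4), ("heygen", v5), ("perplexity", v6), ("social_media", v7), ("crm_lead_gen", v8), ("analytics", v9), ("other", v10)] : PySem.Dict String (List String)).modify "fal.ai" [] (· ++ [url]) =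
    PySem.Dict.mk [("fal.ai", v1 ++ [url]), ("anthropic", v2), ("openai", v3), ("elevenlabs", v4), ("heygen", v5), ("perplexity", v6), ("social_media", v7), ("crm_lead_gen", v8), ("analytics", v9), ("other", v10)] := rfl
theorem pvMod2 (v1 v2 v3 v4 v5 v6 v7 v8 v9 v10 : List String) (url : String) :
    (PySem.Dict.mk [("fal.ai", v1), ("anthropic", v2), ("openai", v3), ("elevenlabs", v4), ("heygen", v5), ("perplexity", v6), ("social_media", v7), ("crm_lead_gen", v8), ("analytics", v9), ("other", v10)] : PySem.Dict String (List String)).modify "anthropic" [] (· ++ [url]) =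
    PySem.Dict.mk [("fal.ai", v1), ("anthropic", v2 ++ [url]), ("openai", v3), ("elevenlabs", v4), ("heygen", v5), ("perplexity", v6), ("social_media", v7), ("crm_lead_gen", v8), ("analytics", v9), ("other", v10)] := rfl
theorem pvMod3 (v1 v2 v3 v4 v5 v6 v7 v8 v9 v10 : List String) (url : String) :
    (PySem.Dict.mk [("fal.ai", v1), ("anthropic", v2), ("openai", v3), ("elevenlabs", v4), ("heygen", v5), ("perplexity", v6), ("social_media", v7), ("crm_lead_gen", v8), ("analytics", v9), ("other", v10)] : PySem.Dict String (List String)).modify "openai" [] (· ++ [url]) =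
    PySem.Dict.mk [("fal.ai", v1), ("anthropic", v2), ("openai", v3 ++ [url]), ("elevenlabs", v4), ("heygen", v5), ("perplexity", v6), ("social_media", v7), ("crm_lead_gen", v8), ("analytics", v9), ("other", v10)] := rfl
theorem pvMod4 (v1 v2 v3 v4 v5 v6 v7 v8 v9 v10 : List String) (url : String) :
    (PySem.Dict.mk [("fal.ai", v1), ("anthropic", v2), ("openai", v3), ("elevenlabs", v4), ("heygen", v5), ("perplexity", v6), ("social_media", v7), ("crm_lead_gen", v8), ("analytics", v9), ("other", v10)] : PySem.Dict String (List String)).modify "elevenlabs" [] (· ++ [url]) =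
    PySem.Dict.mk [("fal.ai", v1), ("anthropic", v2), ("openai", v3), ("elevenlabs", v4 ++ [url]), ("heygen", v5), ("perplexity", v6), ("social_media", v7), ("crm_lead_gen", v8), ("analytics", v9), ("other", v10)] := rfl
theorem pvMod5 (v1 v2 v3 v4 v5 v6 v7 v8 v9 v10 : List String) (url : String) :
    (PySem.Dict.mk [("fal.ai", v1), ("anthropic", v2), ("openai", v3), ("elevenlabs", v4), ("heygen", v5), ("perplexity", v6), ("social_media", v7), ("crm_lead_gen", v8), ("analytics", v9), ("other", v10)] : PySem.Dict String (List String)).modify "heygen" [] (· ++ [url]) =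
    PySem.Dict.mk [("fal.ai", v1), ("anthropic", v2), ("openai", v3), ("elevenlabs", v4), ("heygen", v5 ++ [url]), ("perplexity", v6), ("social_media", v7), ("crm_lead_gen", v8), ("analytics", v9), ("other", v10)] := rfl
theorem pvMod6 (v1 v2 v3 v4 v5 v6 v7 v8 v9 v10 : List String) (url : String) :
    (PySem.Dict.mk [("fal.ai", v1), ("anthropic", v2), ("openai", v3), ("elevenlabs", v4), ("heygen", v5), ("perplexity", v6), ("social_media", v7), ("crm_lead_gen", v8), ("analytics", v9), ("other", v10)] : PySem.Dict String (List String)).modify "perplexity" [] (· ++ [url]) =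
    PySem.Dict.mk [("fal.ai", v1), ("anthropic", v2), ("openai", v3), ("elevenlabs", v4), ("heygen", v5), ("perplexity", v6 ++ [url]), ("social_media", v7), ("crm_lead_gen", v8), ("analytics", v9), ("other", v10)] := rfl
theorem pvMod7 (v1 v2 v3 v4 v5 v6 v7 v8 v9 v10 : List String) (url : String) :
    (PySem.Dict.mk [("fal.ai", v1), ("anthropic", v2), ("openai", v3), ("elevenlabs", v4), ("heygen", v5), ("perplexity", v6), ("social_media", v7), ("crm_lead_gen", v8), ("analytics", v9), ("other", v10)] : PySem.Dict String (List String)).modify "social_media" [] (· ++ [url]) =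
    PySem.Dict.mk [("fal.ai", v1), ("anthropic", v2), ("openai", v3), ("elevenlabs", v4), ("heygen", v5), ("perplexity", v6), ("social_media", v7 ++ [url]), ("crm_lead_gen", v8), ("analytics", v9), ("other", v10)] := rfl
theorem pvMod8 (v1 v2 v3 v4 v5 v6 v7 v8 v9 v10 : List String) (url : String) :
    (PySem.Dict.mk [("fal.ai", v1), ("anthropic", v2), ("openai", v3), ("elevenlabs", v4), ("heygen", v5), ("perplexity", v6), ("social_media", v7), ("crm_lead_gen", v8), ("analytics", v9), ("other", v10)] : PySem.Dict String (List String)).modify "crm_lead_gen" [] (· ++ [url]) =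
    PySem.Dict.mk [("fal.ai", v1), ("anthropic", v2), ("openai", v3), ("elevenlabs", v4), ("heygen", v5), ("perplexity", v6), ("social_media", v7), ("crm_lead_gen", v8 ++ [url]), ("analytics", v9), ("other", v10)] := rfl
theorem pvMod9 (v1 v2 v3 v4 v5 v6 v7 v8 v9 v10 : List String) (url : String) :
    (PySem.Dict.mk [("fal.ai", v1), ("anthropic", v2), ("openai", v3), ("elevenlabs", v4), ("heygen", v5), ("perplexity", v6), ("social_media", v7), ("crm_lead_gen", v8), ("analytics", v9), ("other", v10)] : PySem.Dict String (List String)).modify "analytics" [] (· ++ [url]) =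
    PySem.Dict.mk [("fal.ai", v1), ("anthropic", v2), ("openai", v3), ("elevenlabs", v4), ("heygen", v5), ("perplexity", v6), ("social_media", v7), ("crm_lead_gen", v8), ("analytics", v9 ++ [url]), ("other", v10)] := rfl
theorem pvMod10 (v1 v2 v3 v4 v5 v6 v7 v8 v9 v10 : List String) (url : String) :
    (PySem.Dict.mk [("fal.ai", v1), ("anthropic", v2), ("openai", v3), ("elevenlabs", v4), ("heygen", v5), ("perplexity", v6), ("social_media", v7), ("crm_lead_gen", v8), ("analytics", v9), ("other", v10)] : PySem.Dict String (List String)).modify "other" [] (· ++ [url]) =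
    PySem.Dict.mk [("fal.ai", v1), ("anthropic", v2), ("openai", v3), ("elevenlabs", v4), ("heygen", v5), ("perplexity", v6), ("social_media", v7), ("crm_lead_gen", v8), ("analytics", v9), ("other", v10 ++ [url])] := rfl

-- A's elif cascade performs exactly one modify, at the key B's pvLabel computes
theorem pvStep (d : PySem.Dict String (List String)) (url : String) :
    (if PySem.Str.isIn "fal.run/fal-ai" (PySem.Str.lower url) then d.modify "fal.ai" [] (· ++ [url])
      else if PySem.Str.isIn "anthropic.com" (PySem.Str.lower url) then d.modify "anthropic" [] (· ++ [url])
      else if PySem.Str.isIn "openai.com" (PySem.Str.lower url) then d.modify "openai" [] (· ++ [url])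
      else if PySem.Str.isIn "elevenlabs.io" (PySem.Str.lower url) then d.modify "elevenlabs" [] (· ++ [url])
      else if PySem.Str.isIn "heygen.com" (PySem.Str.lower url) then d.modify "heygen" [] (· ++ [url])
      else if PySem.Str.isIn "perplexity.ai" (PySem.Str.lower url) then d.modify "perplexity" [] (· ++ [url])
      else if (["blotato", "klap", "simplified", "predis", "metricool", "telegram"].any (fun x => PySem.Str.isIn x (PySem.Str.lower url))) then d.modify "social_media" [] (· ++ [url])
      else if (["apollo.io", "snov.io", "hubapi.com", "wassenger"].any (fun x => PySem.Str.isIn x (PySem.Str.lower url))) then d.modify "crm_lead_gen" [] (· ++ [url])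
      else if (["analytics", "tracking", "newsapi", "reddit", "youtube"].any (fun x => PySem.Str.isIn x (PySem.Str.lower url))) then d.modify "analytics" [] (· ++ [url])
      else d.modify "other" [] (· ++ [url])) = d.modify (pvLabel url) [] (· ++ [url]) := by
  simp only [pvLabel, pvLabelGo, pvRules, List.any_cons, List.any_nil, Bool.or_false]
  split_ifs <;> rfl

theorem pv_label_cases (url : String) : pvLabel url = "fal.ai" ∨ pvLabel url = "anthropic" ∨ pvLabel url = "openai" ∨ pvLabel url = "elevenlabs" ∨ pvLabel url = "heygen" ∨ pvLabel url = "perplexity" ∨ pvLabel url = "social_media" ∨ pvLabel url = "crm_lead_gen" ∨ pvLabel url = "analytics" ∨ pvLabel url = "other" := by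
  simp only [pvLabel, pvLabelGo, pvRules]
  split_ifs <;> simp

-- loop invariant: folding A's step over any start contents yields each start list
-- followed by the urls whose pvLabel is that category, in order
theorem pv_inv (urls : List String) : ∀ (v1 v2 v3 v4 v5 v6 v7 v8 v9 v10 : List String),
    (urls.foldl (fun d url => d.modify (pvLabel url) [] (· ++ [url]))
     (PySem.Dict.mk [("fal.ai", v1), ("anthropic", v2), ("openai", v3), ("elevenlabs", v4), ("heygen", v5), ("perplexity", v6), ("social_media", v7), ("crm_lead_gen", v8), ("analytics", v9), ("other", v10)])).items =
    [("fal.ai", v1 ++ urls.filter (fun u => pvLabel u == "fal.ai")),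
     ("anthropic", v2 ++ urls.filter (fun u => pvLabel u == "anthropic")),
     ("openai", v3 ++ urls.filter (fun u => pvLabel u == "openai")),
     ("elevenlabs", v4 ++ urls.filter (fun u => pvLabel u == "elevenlabs")),
     ("heygen", v5 ++ urls.filter (fun u => pvLabel u == "heygen")),
     ("perplexity", v6 ++ urls.filter (fun u => pvLabel u == "perplexity")),
     ("social_media", v7 ++ urls.filter (fun u => pvLabel u == "social_media")),
     ("crm_lead_gen", v8 ++ urls.filter (fun u => pvLabel u == "crm_lead_gen")),
     ("analytics", v9 ++ urls.filter (fun u => pvLabel u == "analytics")),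
     ("other", v10 ++ urls.filter (fun u => pvLabel u == "other"))] := by
  induction urls with
  | nil => intro v1 v2 v3 v4 v5 v6 v7 v8 v9 v10; simp
  | cons url rest ih =>
    intro v1 v2 v3 v4 v5 v6 v7 v8 v9 v10
    simp only [List.foldl_cons, List.filter_cons]
    rcases pv_label_cases url with h|h|h|h|h|h|h|h|h|h
    · rw [h, pvMod1, ih]
      simp
    · rw [h, pvMod2, ih]
      simp
    · rw [h, pvMod3, ih]
      simp
    · rw [h, pvMod4, ih]
      simp
    · rw [h, pvMod5, ih]
      simp
    · rw [h, pvMod6, ih]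
      simp
    · rw [h, pvMod7, ih]
      simp
    · rw [h, pvMod8, ih]
      simp
    · rw [h, pvMod9, ih]
      simp
    · rw [h, pvMod10, ih]
      simp

-- ===== VERDICT (by name: the statement is the Claim_ definition above) =====
theorem categorize_apis_spec : Claim_equal_categorize_apis := by
  intro api_urls _
  unfold Spec_categorize_apis categorize_apis categorize_apis_alt
  simp only [pvStep, pvRules]
  simpa [List.filter_map, Function.comp_def, List.map_map] using
    pv_inv api_urls [] [] [] [] [] [] [] [] [] []
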